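-- pv_equiv track=rewrite | github.com/SakshiBedarkar/CJ | CJ2.py | check
-- ===== SOURCE A (Python) =====
-- def check(s, m):
--     l = len(s);
--     c2 = 0;
--     for i in range(0, l - 1):
--         if (s[i] == '1'):
--             c2 = c2 + 1
--         if ( c2 == m):
--             return True;
--     return False;
-- ===== SOURCE B (Python) =====
-- def check(s, m):
--     # m appears among the running '1'-counts of s[:-1] iff it lies between
--     # the first prefix count and the total count (the sequence is
--     # nondecreasing with unit steps).
--     t = s[:-1]
--     if not t:
--         return False
--     lo = 1 if t[0] == '1' else 0
--     return lo <= m <= t.count('1')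
-- ===== Notes on version B (the rewrite author's own statement) =====
-- stated objective: simpler
-- what changed: Replaced A's indexed loop with running counter and early return by a closed-form membership test: m is among the running prefix-counts of '1' in s[:-1] iff first-prefix-count <= m <= total count, computed with one slice and one C-level count call.
import Mathlib
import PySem

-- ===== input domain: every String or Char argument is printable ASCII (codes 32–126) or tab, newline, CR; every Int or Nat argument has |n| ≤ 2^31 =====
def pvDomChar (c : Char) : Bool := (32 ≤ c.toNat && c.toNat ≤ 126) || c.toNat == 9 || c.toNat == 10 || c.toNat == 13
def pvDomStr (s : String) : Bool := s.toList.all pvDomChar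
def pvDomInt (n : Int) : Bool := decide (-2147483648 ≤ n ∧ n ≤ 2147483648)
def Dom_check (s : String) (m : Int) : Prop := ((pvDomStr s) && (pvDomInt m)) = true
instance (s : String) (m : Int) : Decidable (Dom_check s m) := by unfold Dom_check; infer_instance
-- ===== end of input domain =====

-- B replaces A's counting loop with a closed-form bounds test on the prefix counts; objective: simpler.

-- ===== PORT A =====
-- A's for-loop over i in range(0, l-1) reads s[i] in order: the loop body is the
-- recursion below over the chars of s minus its last one, carrying the counter c2.
def checkGo (cs : List Char) (m : Int) (c2 : Int) : Bool :=
  match cs with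
  | [] => false
  | c :: rest =>
    let c2' := if c == '1' then c2 + 1 else c2
    if c2' == m then true else checkGo rest m c2'

def check (s : String) (m : Int) : Bool :=
  checkGo s.toList.dropLast m 0

-- ===== PORT B =====
def check_alt (s : String) (m : Int) : Bool :=
  let t := s.toList.dropLast      -- s[:-1]
  match t with
  | [] => false
  | c :: _ => (if c == '1' then (1 : Int) else 0) ≤ m && m ≤ (t.count '1' : Int)

-- ===== PRECONDITION & SPEC =====
def Spec_check (s : String) (m : Int) (out : Bool) : Prop := out = check_alt s m
instance (s : String) (m : Int) (out : Bool) : Decidable (Spec_check s m out) := by unfold Spec_check; infer_instance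

-- ===== CLAIM (what is proved, stated in full; the proofs are below) =====
def Claim_equal_check : Prop := ∀ (s : String) (m : Int), Dom_check s m → Spec_check s m (check s m)

-- ===== LEMMAS AND PROOFS =====
theorem checkGo_eq (cs : List Char) (m : Int) : ∀ c2 : Int,
    checkGo cs m c2 =
      match cs with
      | [] => false
      | c :: _ => decide ((c2 + (if c == '1' then (1:Int) else 0)) ≤ m ∧ m ≤ c2 + (cs.count '1' : Int)) := by
  induction cs with
  | nil => intro c2; rfl
  | cons c rest ih =>
    intro c2
    simp only [checkGo]
    by_cases hc : (if c == '1' then c2 + 1 else c2) == m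
    · have hm : (if c == '1' then c2 + 1 else c2) = m := by exact_mod_cast eq_of_beq hc
      simp only [hc, if_pos]
      refine (decide_eq_true ?_).symm
      have hcount : (if c == '1' then (1:Int) else 0) ≤ ((c :: rest).count '1' : Int) := by
        simp only [List.count_cons]
        split_ifs <;> omega
      split_ifs at hm hcount ⊢ <;> constructor <;> omega
    · simp only [hc, if_neg, Bool.false_eq_true, not_false_iff]
      rw [ih]
      have hne : (if c == '1' then c2 + 1 else c2) ≠ m := fun h => hc (by exact beq_iff_eq.mpr h)
      cases rest with
      | nil =>
        simp only [List.count_cons, List.count_nil]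
        split_ifs at hne ⊢ <;> simp_all <;> omega
      | cons d rest' =>
        have hcnt : ((c :: d :: rest').count '1') = (if c == '1' then 1 else 0) + ((d :: rest').count '1') := by
          simp [List.count_cons]; split_ifs <;> omega
        rw [hcnt]
        have hd : (0:Int) ≤ (if d == '1' then (1:Int) else 0) ∧ (if d == '1' then (1:Int) else 0) ≤ 1 := by
          split_ifs <;> omega
        push_cast
        split_ifs at hne hd ⊢ <;> simp only [decide_eq_decide] <;> push_cast <;> omega

-- ===== VERDICT (by name: the statement is the Claim_ definition above) =====
theorem check_spec : Claim_equal_check := by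
  intro s m _
  unfold Spec_check check check_alt
  rw [checkGo_eq]
  cases h : s.toList.dropLast with
  | nil => rfl
  | cons c rest =>
    simp only [zero_add]
    simp [Bool.decide_and]
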